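-- pv_equiv track=rewrite | github.com/LEAGURARIE/WeatherProject | utills/__init__.py | filter_cities
-- ===== SOURCE A (Python) =====
-- def filter_cities(query, city_list):
--     """Filter cities based on user query with smart matching"""
--     if not query:
--         return []
--
--     query_lower = query.lower().strip()
--
--     # Exact matches first
--     exact_matches = [city for city in city_list if city.lower() == query_lower]
--
--     # Starts with matches
--     starts_with = [city for city in city_list
--                    if city.lower().startswith(query_lower) and city not in exact_matches]
--
--     # Contains matches
--     contains = [city for city in city_list
--                 if query_lower in city.lower() and city not in exact_matches + starts_with]
--
--     return exact_matches + starts_with + contains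
-- ===== SOURCE B (Python) =====
-- def filter_cities(query, city_list):
--     """Filter cities based on user query with smart matching (single pass)."""
--     if not query:
--         return []
--     q = query.lower().strip()
--     exact, starts, contains = [], [], []
--     for city in city_list:
--         cl = city.lower()
--         if cl == q:
--             exact.append(city)
--         elif cl.startswith(q):
--             starts.append(city)
--         elif q in cl:
--             contains.append(city)
--     return exact + starts + contains
-- ===== Notes on version B (the rewrite author's own statement) =====
-- stated objective: faster
-- what changed: Replaces three comprehensions with quadratic 'city not in previous-bucket' membership scans by a single pass that assigns each city to its highest-priority bucket via an if/elif chain.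
import Mathlib
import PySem

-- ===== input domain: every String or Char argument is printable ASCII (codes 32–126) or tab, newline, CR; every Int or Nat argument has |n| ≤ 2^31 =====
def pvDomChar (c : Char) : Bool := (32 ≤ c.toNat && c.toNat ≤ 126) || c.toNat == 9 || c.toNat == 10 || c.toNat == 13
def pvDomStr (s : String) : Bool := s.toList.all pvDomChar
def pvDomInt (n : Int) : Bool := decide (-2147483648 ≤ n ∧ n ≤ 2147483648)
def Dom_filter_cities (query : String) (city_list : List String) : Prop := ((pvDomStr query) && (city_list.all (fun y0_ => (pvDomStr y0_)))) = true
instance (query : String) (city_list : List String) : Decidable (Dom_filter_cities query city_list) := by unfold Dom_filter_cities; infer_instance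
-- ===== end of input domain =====

-- B replaces A's quadratic bucket construction (three comprehensions with 'not in earlier-bucket'
-- membership scans) by one pass assigning each city to its highest-priority bucket; same return value.
-- ===== PORT A =====
def filter_cities (query : String) (city_list : List String) : List String :=
  if query = "" then []
  else
    let query_lower := PySem.Str.strip (PySem.Str.lower query)
    let exact_matches := city_list.filter (fun city => PySem.Str.lower city == query_lower)
    let starts_with := city_list.filter (fun city =>
      PySem.Str.startswith (PySem.Str.lower city) query_lower && !(exact_matches.contains city))
    let contains := city_list.filter (fun city =>
      PySem.Str.isIn query_lower (PySem.Str.lower city) && !((exact_matches ++ starts_with).contains city))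
    exact_matches ++ starts_with ++ contains

-- ===== PORT B =====
def pvStep (q : String) (acc : List String × List String × List String) (city : String) :
    List String × List String × List String :=
  let cl := PySem.Str.lower city
  if cl == q then (acc.1 ++ [city], acc.2.1, acc.2.2)
  else if PySem.Str.startswith cl q then (acc.1, acc.2.1 ++ [city], acc.2.2)
  else if PySem.Str.isIn q cl then (acc.1, acc.2.1, acc.2.2 ++ [city])
  else acc

def filter_cities_alt (query : String) (city_list : List String) : List String :=
  if query = "" then []
  else
    let q := PySem.Str.strip (PySem.Str.lower query)
    let r := city_list.foldl (pvStep q) ([], [], [])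
    r.1 ++ r.2.1 ++ r.2.2

-- ===== PRECONDITION & SPEC =====
def Spec_filter_cities (query : String) (city_list : List String) (out : List String) : Prop := out = filter_cities_alt query city_list
instance (query : String) (city_list : List String) (out : List String) : Decidable (Spec_filter_cities query city_list out) := by unfold Spec_filter_cities; infer_instance

-- ===== CLAIM (what is proved, stated in full; the proofs are below) =====
def Claim_equal_filter_cities : Prop := ∀ (query : String) (city_list : List String), Dom_filter_cities query city_list → Spec_filter_cities query city_list (filter_cities query city_list)

-- ===== LEMMAS AND PROOFS =====
-- the three disjoint bucket predicates of B's single pass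
def pvP0 (q city : String) : Bool := PySem.Str.lower city == q
def pvP1 (q city : String) : Bool := !(pvP0 q city) && PySem.Str.startswith (PySem.Str.lower city) q
def pvP2 (q city : String) : Bool :=
  !(pvP0 q city) && !(PySem.Str.startswith (PySem.Str.lower city) q) && PySem.Str.isIn q (PySem.Str.lower city)

theorem pvFoldl_step (q : String) (l e s c : List String) :
    l.foldl (pvStep q) (e, s, c) =
      (e ++ l.filter (pvP0 q), s ++ l.filter (pvP1 q), c ++ l.filter (pvP2 q)) := by
  induction l generalizing e s c with
  | nil => simp
  | cons x xs ih =>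
    by_cases h0 : (PySem.Str.lower x == q) = true
    · simp [pvStep, pvP0, pvP1, pvP2, h0, ih, List.append_assoc]
    · by_cases h1 : PySem.Chars.startswith (PySem.Chars.lower x.toList) q.toList = true
      · simp [pvStep, pvP0, pvP1, pvP2, h0, h1, ih, List.append_assoc]
      · by_cases h2 : PySem.Chars.isIn q.toList (PySem.Chars.lower x.toList) = true
        · simp [pvStep, pvP0, pvP1, pvP2, h0, h1, h2, ih, List.append_assoc]
        · simp [pvStep, pvP0, pvP1, pvP2, h0, h1, h2, ih]

theorem pvMem_exact (q : String) (l : List String) (city : String) (h : city ∈ l) :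
    (l.filter (fun c => PySem.Str.lower c == q)).contains city = (PySem.Str.lower city == q) := by
  by_cases hp : (PySem.Str.lower city == q) = true
  · simp [List.contains_eq_mem, List.mem_filter, h, hp]
  · simp only [List.contains_eq_mem, List.mem_filter]
    simp [hp]

theorem pvMem_starts (q : String) (l : List String) (city : String) (h : city ∈ l) :
    (l.filter (pvP1 q)).contains city = pvP1 q city := by
  by_cases hp : pvP1 q city = true
  · simp [List.contains_eq_mem, List.mem_filter, h, hp]
  · simp only [List.contains_eq_mem, List.mem_filter]
    simp [hp]

-- ===== VERDICT (by name: the statement is the Claim_ definition above) =====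
theorem filter_cities_spec : Claim_equal_filter_cities := by
  intro query city_list _
  unfold Spec_filter_cities filter_cities filter_cities_alt
  by_cases hq : query = ""
  · simp [hq]
  · simp only [hq, ite_false]
    set q := PySem.Str.strip (PySem.Str.lower query) with hqdef
    rw [pvFoldl_step]
    simp only [List.nil_append]
    have hExact : city_list.filter (fun city => PySem.Str.lower city == q) = city_list.filter (pvP0 q) := by
      rfl
    have hStarts :
        city_list.filter (fun city =>
          PySem.Str.startswith (PySem.Str.lower city) q &&
            !((city_list.filter (fun c => PySem.Str.lower c == q)).contains city)) =
        city_list.filter (pvP1 q) := by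
      apply List.filter_congr
      intro city hmem
      rw [pvMem_exact q city_list city hmem]
      unfold pvP1 pvP0
      cases (PySem.Str.lower city == q) <;>
        cases PySem.Str.startswith (PySem.Str.lower city) q <;> rfl
    have hContains :
        city_list.filter (fun city =>
          PySem.Str.isIn q (PySem.Str.lower city) &&
            !((city_list.filter (fun c => PySem.Str.lower c == q) ++
               city_list.filter (fun c =>
                 PySem.Str.startswith (PySem.Str.lower c) q &&
                   !((city_list.filter (fun c' => PySem.Str.lower c' == q)).contains c))).contains city)) =
        city_list.filter (pvP2 q) := by
      apply List.filter_congr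
      intro city hmem
      rw [hStarts]
      simp only [List.contains_append]
      rw [pvMem_exact q city_list city hmem, pvMem_starts q city_list city hmem]
      unfold pvP2 pvP1 pvP0
      cases (PySem.Str.lower city == q) <;>
        cases PySem.Str.startswith (PySem.Str.lower city) q <;>
        cases PySem.Str.isIn q (PySem.Str.lower city) <;> rfl
    rw [hContains, hStarts, hExact]
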